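-- pv_equiv track=rewrite | github.com/serhii-soboliev/crackinginterview | crackinginterview-source/algo/leetcode/tasks/dp_877_stone_game.py | result1
-- ===== SOURCE A (Python) =====
-- def result1(piles) -> bool:
--     n = len(piles)
--     max_cost = [[0 for _ in range(n)] for _ in range(n)]
--
--     for i in range(n):
--         max_cost[i][i] = piles[i]
--
--     for size in range(2, n+1):
--         for start in range(0, n-size+1):
--             end = start + size - 1
--             if end < n:
--                 max_cost[start][end] = max(piles[start] - max_cost[start + 1][end],
--                                            piles[end] - max_cost[start][end - 1])
--     return max_cost[0][n - 1] > 0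
-- ===== SOURCE B (Python) =====
-- def result1(piles) -> bool:
--     # Top-down memoized recursion on interval endpoints instead of a bottom-up table.
--     memo = {}
--
--     def dp(i, j):
--         if i == j:
--             return piles[i]
--         if (i, j) not in memo:
--             memo[(i, j)] = max(piles[i] - dp(i + 1, j), piles[j] - dp(i, j - 1))
--         return memo[(i, j)]
--
--     return dp(0, len(piles) - 1) > 0
-- ===== Notes on version B (the rewrite author's own statement) =====
-- stated objective: alternative
-- what changed: Replaces A's bottom-up n-by-n table filled by increasing interval size with a top-down memoized recursion dp(i,j) on interval endpoints, caching results in a dict.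
import Mathlib
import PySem

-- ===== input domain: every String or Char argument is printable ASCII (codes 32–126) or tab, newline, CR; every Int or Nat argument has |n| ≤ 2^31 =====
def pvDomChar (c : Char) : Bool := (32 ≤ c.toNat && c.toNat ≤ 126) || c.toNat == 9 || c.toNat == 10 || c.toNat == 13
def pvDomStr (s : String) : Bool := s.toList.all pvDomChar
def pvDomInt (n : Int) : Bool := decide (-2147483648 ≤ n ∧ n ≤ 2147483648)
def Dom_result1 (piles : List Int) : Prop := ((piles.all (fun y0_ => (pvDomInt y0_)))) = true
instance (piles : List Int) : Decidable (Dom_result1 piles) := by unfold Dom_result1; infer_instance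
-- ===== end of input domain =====

-- B replaces A's bottom-up n×n interval table (filled by increasing size) with a
-- top-down memoized recursion dp(i, j) on interval endpoints, caching in a dict.

-- ===== PORT A =====
def result1 (piles : List Int) : Bool :=
  let n : Int := (piles.length : Int)
  let maxCost : List (List Int) :=
    (PySem.List.pyRange 0 n 1).map (fun _ =>
      (PySem.List.pyRange 0 n 1).map (fun _ => (0 : Int)))
  let maxCost :=
    (PySem.List.pyRange 0 n 1).foldl (fun mc i =>
      PySem.List.pySetD mc i
        (PySem.List.pySetD (PySem.List.pyGetD mc i []) i (PySem.List.pyGetD piles i 0))) maxCost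
  let maxCost :=
    (PySem.List.pyRange 2 (n + 1) 1).foldl (fun mc size =>
      (PySem.List.pyRange 0 (n - size + 1) 1).foldl (fun mc start =>
        let endi := start + size - 1
        if endi < n then
          PySem.List.pySetD mc start
            (PySem.List.pySetD (PySem.List.pyGetD mc start []) endi
              (max (PySem.List.pyGetD piles start 0 -
                    PySem.List.pyGetD (PySem.List.pyGetD mc (start + 1) []) endi 0)
                   (PySem.List.pyGetD piles endi 0 -
                    PySem.List.pyGetD (PySem.List.pyGetD mc start []) (endi - 1) 0)))
        else mc) mc) maxCost
  decide (PySem.List.pyGetD (PySem.List.pyGetD maxCost 0 []) (n - 1) 0 > 0)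

-- ===== PORT B =====
-- dp(i, j) with the memo dict threaded through; the fuel argument only makes the
-- recursion total in Lean (Python's dp recurses on j - i, which the fuel bounds:
-- each call's fuel exceeds (j - i).toNat on every admitted input, so it never hits 0).
def dpGoB (piles : List Int) : Nat → Int → Int → PySem.Dict (Int × Int) Int →
    Int × PySem.Dict (Int × Int) Int
  | 0, _, _, memo => (0, memo)
  | fuel + 1, i, j, memo =>
    if i == j then (PySem.List.pyGetD piles i 0, memo)
    else
      match memo.get? (i, j) with
      | some v => (v, memo)
      | none =>
        let r1 := dpGoB piles fuel (i + 1) j memo        -- (dp(i+1, j), memo)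
        let r2 := dpGoB piles fuel i (j - 1) r1.2        -- (dp(i, j-1), memo)
        let v := max (PySem.List.pyGetD piles i 0 - r1.1)
                     (PySem.List.pyGetD piles j 0 - r2.1)
        (v, r2.2.insert (i, j) v)

def result1_alt (piles : List Int) : Bool :=
  decide ((dpGoB piles piles.length 0 ((piles.length : Int) - 1) PySem.Dict.empty).1 > 0)

-- ===== PRECONDITION & SPEC =====
-- On the empty list both Pythons raise IndexError (A at max_cost[0][-1], B at piles[0]);
-- Pre_ excludes exactly that input.
def Pre_result1 (piles : List Int) : Prop := piles ≠ []
instance (piles : List Int) : Decidable (Pre_result1 piles) := by unfold Pre_result1; infer_instance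
def pvWitness_result1 : List Int := ([5, 3, 4, 5])

def Spec_result1 (piles : List Int) (out : Bool) : Prop := out = result1_alt piles
instance (piles : List Int) (out : Bool) : Decidable (Spec_result1 piles out) := by unfold Spec_result1; infer_instance

-- ===== CLAIM (what is proved, stated in full; the proofs are below) =====
def Claim_equal_result1 : Prop := ∀ (piles : List Int), Dom_result1 piles → Pre_result1 piles → Spec_result1 piles (result1 piles)

-- ===== LEMMAS AND PROOFS =====

-- reference value: optimal score margin for the interval [i, j]
def fval (p : List Int) (i j : Nat) : Int :=
  if _h : i < j then
    max (p.getD i 0 - fval p (i + 1) j) (p.getD j 0 - fval p i (j - 1))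
  else p.getD i 0
termination_by j - i
decreasing_by all_goals omega

theorem fval_diag (p : List Int) (i : Nat) : fval p i i = p.getD i 0 := by
  rw [fval]; simp

theorem fval_step (p : List Int) {i j : Nat} (h : i < j) :
    fval p i j = max (p.getD i 0 - fval p (i + 1) j) (p.getD j 0 - fval p i (j - 1)) := by
  rw [fval]; simp [h]

-- ---- generic index/set helpers ----
theorem myGetD (xs : List Int) (i : Int) (h : 0 ≤ i) :
    PySem.List.pyGetD xs i 0 = xs.getD i.toNat 0 := by
  simp [PySem.List.pyGetD, PySem.List.pyGet?_of_nonneg xs h, List.getD_eq_getElem?_getD]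

theorem myGetDL (T : List (List Int)) (i : Int) (h : 0 ≤ i) :
    PySem.List.pyGetD T i [] = T.getD i.toNat [] := by
  simp [PySem.List.pyGetD, PySem.List.pyGet?_of_nonneg T h, List.getD_eq_getElem?_getD]

theorem getD_set' {a : Type} (xs : List a) (i k : Nat) (v d : a) :
    (xs.set i v).getD k d = if i = k ∧ i < xs.length then v else xs.getD k d := by
  simp only [List.getD_eq_getElem?_getD, List.getElem?_set]
  by_cases h1 : i = k
  · subst h1
    by_cases h2 : i < xs.length <;> simp [h2]
  · simp [h1]

-- ---- table accessors ----
def g2 (T : List (List Int)) (i j : Nat) : Int := (T.getD i []).getD j 0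

def Shape (T : List (List Int)) (len : Nat) : Prop :=
  T.length = len ∧ ∀ k : Nat, k < len → (T.getD k []).length = len

theorem g2_write (T : List (List Int)) (len : Nat) (hS : Shape T len)
    (i j : Nat) (hi : i < len) (hj : j < len) (v : Int) :
    Shape (T.set i ((T.getD i []).set j v)) len ∧
    ∀ a b : Nat, g2 (T.set i ((T.getD i []).set j v)) a b =
      if a = i ∧ b = j then v else g2 T a b := by
  obtain ⟨hT, hrows⟩ := hS
  have hiT : i < T.length := by omega
  have hrow : (T.getD i []).length = len := hrows i hi
  constructor
  · constructor
    · rw [List.length_set]; exact hT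
    · intro k hk
      rw [getD_set']
      by_cases h : i = k
      · rw [if_pos ⟨h, hiT⟩, List.length_set]; exact hrow
      · rw [if_neg (fun hc => h hc.1)]; exact hrows k hk
  · intro a b
    unfold g2
    rw [getD_set']
    by_cases ha : i = a
    · subst ha
      rw [if_pos ⟨rfl, hiT⟩, getD_set']
      by_cases hb : j = b
      · subst hb
        rw [if_pos ⟨rfl, by omega⟩, if_pos ⟨rfl, rfl⟩]
      · rw [if_neg (fun hc => hb hc.1), if_neg (fun hc => hb hc.2.symm)]
    · rw [if_neg (fun hc => ha hc.1), if_neg (fun hc => ha hc.1.symm)]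

-- ---- named pieces of port A (definitionally equal to the port bodies) ----
def fA1 (p : List Int) (mc : List (List Int)) (i : Int) : List (List Int) :=
  PySem.List.pySetD mc i
    (PySem.List.pySetD (PySem.List.pyGetD mc i []) i (PySem.List.pyGetD p i 0))

def fA2i (p : List Int) (n size : Int) (mc : List (List Int)) (start : Int) : List (List Int) :=
  let endi := start + size - 1
  if endi < n then
    PySem.List.pySetD mc start
      (PySem.List.pySetD (PySem.List.pyGetD mc start []) endi
        (max (PySem.List.pyGetD p start 0 -
              PySem.List.pyGetD (PySem.List.pyGetD mc (start + 1) []) endi 0)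
             (PySem.List.pyGetD p endi 0 -
              PySem.List.pyGetD (PySem.List.pyGetD mc start []) (endi - 1) 0)))
  else mc

def tableA (p : List Int) : List (List Int) :=
  (PySem.List.pyRange 2 ((p.length : Int) + 1) 1).foldl
    (fun mc size => (PySem.List.pyRange 0 ((p.length : Int) - size + 1) 1).foldl
      (fA2i p (p.length : Int) size) mc)
    ((PySem.List.pyRange 0 (p.length : Int) 1).foldl (fA1 p)
      ((PySem.List.pyRange 0 (p.length : Int) 1).map (fun _ =>
        (PySem.List.pyRange 0 (p.length : Int) 1).map (fun _ => (0 : Int)))))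

theorem result1_eq_table (p : List Int) :
    result1 p = decide (PySem.List.pyGetD (PySem.List.pyGetD (tableA p) 0 []) ((p.length : Int) - 1) 0 > 0) := rfl

-- ================= A side =================

theorem diagLoop (p : List Int) (len : Nat) :
    ∀ (m : Nat) (a : Int) (T : List (List Int)), 0 ≤ a → a + m = len → Shape T len →
      (∀ k : Nat, k < len → k < a.toNat → g2 T k k = p.getD k 0) →
      Shape ((PySem.List.pyRange a len 1).foldl (fA1 p) T) len ∧
      ∀ k : Nat, k < len → g2 ((PySem.List.pyRange a len 1).foldl (fA1 p) T) k k = p.getD k 0 := by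
  intro m
  induction m with
  | zero =>
    intro a T ha hm hS hdiag
    rw [PySem.List.pyRange_one_eq_nil (by omega)]
    exact ⟨hS, fun k hk => hdiag k hk (by omega)⟩
  | succ m ih =>
    intro a T ha hm hS hdiag
    rw [PySem.List.pyRange_one_cons (by omega), List.foldl_cons]
    have haT : a.toNat < len := by omega
    have hstep : fA1 p T a = T.set a.toNat ((T.getD a.toNat []).set a.toNat (p.getD a.toNat 0)) := by
      unfold fA1
      rw [myGetD p a ha, myGetDL T a ha, PySem.List.pySetD_of_nonneg _ _ ha,
          PySem.List.pySetD_of_nonneg _ _ ha]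
    obtain ⟨hS', hg'⟩ := g2_write T len hS a.toNat a.toNat haT haT (p.getD a.toNat 0)
    rw [hstep]
    refine ih (a + 1) _ (by omega) (by omega) hS' ?_
    intro k hk hka
    rw [hg' k k]
    by_cases h : k = a.toNat
    · simp [h]
    · simp [h]; exact hdiag k hk (by omega)

-- fval-correctness of all cells of interval length < s
def Qlt (p : List Int) (len s : Nat) (T : List (List Int)) : Prop :=
  ∀ i j : Nat, i ≤ j → j < len → j + 1 < i + s → g2 T i j = fval p i j

theorem innerLoopA (p : List Int) (len : Nat) (s : Int)
    (hs2 : 2 ≤ s) (hsn : s ≤ (len : Int)) :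
    ∀ (m : Nat) (t : Int) (T : List (List Int)), 0 ≤ t → t + m = (len : Int) - s + 1 →
      Shape T len → Qlt p len s.toNat T →
      (∀ st : Nat, st < t.toNat → g2 T st (st + s.toNat - 1) = fval p st (st + s.toNat - 1)) →
      Shape ((PySem.List.pyRange t ((len : Int) - s + 1) 1).foldl (fA2i p len s) T) len ∧
      Qlt p len s.toNat ((PySem.List.pyRange t ((len : Int) - s + 1) 1).foldl (fA2i p len s) T) ∧
      (∀ st : Nat, st + s.toNat ≤ len →
        g2 ((PySem.List.pyRange t ((len : Int) - s + 1) 1).foldl (fA2i p len s) T) st (st + s.toNat - 1) =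
        fval p st (st + s.toNat - 1)) := by
  intro m
  induction m with
  | zero =>
    intro t T ht hm hS hQ hdone
    rw [PySem.List.pyRange_one_eq_nil (by omega)]
    exact ⟨hS, hQ, fun st hst => hdone st (by omega)⟩
  | succ m ih =>
    intro t T ht hm hS hQ hdone
    rw [PySem.List.pyRange_one_cons (by omega), List.foldl_cons]
    -- the step
    have hend : t + s - 1 < (len : Int) := by omega
    have h0e : 0 ≤ t + s - 1 := by omega
    have h0t1 : 0 ≤ t + 1 := by omega
    have h0e1 : 0 ≤ t + s - 1 - 1 := by omega
    set nt := t.toNat with hnt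
    set ns := s.toNat with hns
    have hntns : (t + s - 1).toNat = nt + ns - 1 := by omega
    have hread1 : g2 T (nt + 1) (nt + ns - 1) = fval p (nt + 1) (nt + ns - 1) :=
      hQ _ _ (by omega) (by omega) (by omega)
    have hread2 : g2 T nt (nt + ns - 2) = fval p nt (nt + ns - 2) :=
      hQ _ _ (by omega) (by omega) (by omega)
    have hv : max (p.getD nt 0 - fval p (nt + 1) (nt + ns - 1))
                  (p.getD (nt + ns - 1) 0 - fval p nt (nt + ns - 2)) = fval p nt (nt + ns - 1) := by
      rw [fval_step p (show nt < nt + ns - 1 from by omega),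
          show nt + ns - 1 - 1 = nt + ns - 2 from by omega]
    have hstep : fA2i p len s T t =
        T.set nt ((T.getD nt []).set (nt + ns - 1)
          (max (p.getD nt 0 - g2 T (nt + 1) (nt + ns - 1))
               (p.getD (nt + ns - 1) 0 - g2 T nt (nt + ns - 2)))) := by
      simp only [fA2i, if_pos hend]
      rw [myGetD p t ht, myGetD p (t + s - 1) h0e,
          myGetDL T t ht, myGetDL T (t + 1) h0t1,
          PySem.List.pySetD_of_nonneg _ _ ht, PySem.List.pySetD_of_nonneg _ _ h0e,
          myGetD (T.getD (t + 1).toNat []) (t + s - 1) h0e,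
          myGetD (T.getD t.toNat []) (t + s - 1 - 1) h0e1,
          show (t + s - 1).toNat = nt + ns - 1 from by omega,
          show (t + s - 1 - 1).toNat = nt + ns - 2 from by omega,
          show (t + 1).toNat = nt + 1 from by omega]
      unfold g2
      rfl
    obtain ⟨hS', hg'⟩ := g2_write T len hS nt (nt + ns - 1) (by omega) (by omega)
      (max (p.getD nt 0 - g2 T (nt + 1) (nt + ns - 1)) (p.getD (nt + ns - 1) 0 - g2 T nt (nt + ns - 2)))
    rw [hstep]
    refine ih (t + 1) _ (by omega) (by omega) hS' ?_ ?_
    · intro i j hij hj hjs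
      rw [hg' i j]
      have : ¬(i = nt ∧ j = nt + ns - 1) := by omega
      rw [if_neg this]
      exact hQ i j hij hj hjs
    · intro st hst
      rw [hg' st (st + ns - 1)]
      by_cases h : st = nt
      · subst h
        rw [if_pos ⟨rfl, rfl⟩, hread1, hread2]
        exact hv
      · have : ¬(st = nt ∧ st + ns - 1 = nt + ns - 1) := by omega
        rw [if_neg this]
        exact hdone st (by omega)

theorem sizeLoopA (p : List Int) (len : Nat) :
    ∀ (m : Nat) (s : Int), 2 ≤ s → s + m = (len : Int) + 1 →
      ∀ T, Shape T len → Qlt p len s.toNat T →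
      ∀ i j : Nat, i ≤ j → j < len →
        g2 ((PySem.List.pyRange s ((len : Int) + 1) 1).foldl
          (fun mc size => (PySem.List.pyRange 0 ((len : Int) - size + 1) 1).foldl
            (fA2i p len size) mc) T) i j = fval p i j := by
  intro m
  induction m with
  | zero =>
    intro s hs2 hm T hS hQ i j hij hj
    rw [PySem.List.pyRange_one_eq_nil (by omega)]
    exact hQ i j hij hj (by omega)
  | succ m ih =>
    intro s hs2 hm T hS hQ i j hij hj
    rw [PySem.List.pyRange_one_cons (by omega), List.foldl_cons]
    obtain ⟨hS', hQ', hnew⟩ := innerLoopA p len s hs2 (by omega)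
      ((len : Int) - s + 1).toNat 0 T (by omega) (by omega) hS hQ (by omega)
    refine ih (s + 1) (by omega) (by omega) _ hS' ?_ i j hij hj
    intro a b hab hb habs
    by_cases h : b + 1 < a + s.toNat
    · exact hQ' a b hab hb h
    · have hb' : b = a + s.toNat - 1 := by omega
      subst hb'
      exact hnew a (by omega)

theorem tableA_correct (p : List Int) (hne : p ≠ []) :
    ∀ i j : Nat, i ≤ j → j < p.length → g2 (tableA p) i j = fval p i j := by
  intro i j hij hj
  have hlen : 1 ≤ p.length := List.length_pos_of_ne_nil hne
  unfold tableA
  have hT0 : ((PySem.List.pyRange 0 (p.length : Int) 1).map (fun _ =>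
      (PySem.List.pyRange 0 (p.length : Int) 1).map (fun _ => (0 : Int)))) =
      List.replicate p.length (List.replicate p.length (0 : Int)) := by
    rw [List.map_const', List.map_const', PySem.List.length_pyRange_one]
    norm_num
  have hS0 : Shape (List.replicate p.length (List.replicate p.length (0 : Int))) p.length := by
    refine ⟨by simp, ?_⟩
    intro k hk
    rw [List.getD_eq_getElem?_getD, List.getElem?_replicate]
    simp [hk]
  rw [hT0]
  obtain ⟨hS1, hdiag⟩ := diagLoop p p.length p.length 0 _ (by omega) (by omega) hS0 (by omega)
  refine sizeLoopA p p.length ((p.length : Int) - 1).toNat 2 (by omega) (by omega) _ hS1 ?_ i j hij hj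
  intro a b hab hb habs
  have : a = b := by omega
  subst this
  rw [hdiag a hb, fval_diag]

-- ================= B side =================

-- memo invariant: every cached entry is the true interval value, with in-range key
def GoodMemo (p : List Int) (memo : PySem.Dict (Int × Int) Int) : Prop :=
  ∀ i j v : Int, memo.get? (i, j) = some v →
    0 ≤ i ∧ i < j ∧ j < (p.length : Int) ∧ v = fval p i.toNat j.toNat

theorem dpGoB_correct (p : List Int) :
    ∀ (fuel : Nat) (i j : Int) (memo : PySem.Dict (Int × Int) Int),
      0 ≤ i → i ≤ j → j < (p.length : Int) → (j - i).toNat < fuel → GoodMemo p memo →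
      (dpGoB p fuel i j memo).1 = fval p i.toNat j.toNat ∧
      GoodMemo p (dpGoB p fuel i j memo).2 := by
  intro fuel
  induction fuel with
  | zero => intro i j memo _ _ _ hf _; omega
  | succ fuel ih =>
    intro i j memo hi hij hjn hf hG
    by_cases heq : i = j
    · subst heq
      simp only [dpGoB, BEq.rfl, if_true]
      exact ⟨by rw [myGetD p i hi, fval_diag], hG⟩
    · have hlt : i < j := by omega
      have hne : (i == j) = false := by simp [heq]
      simp only [dpGoB, hne, Bool.false_eq_true, if_false]
      cases hmem : memo.get? (i, j) with
      | some v =>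
        obtain ⟨_, _, _, hv⟩ := hG i j v hmem
        exact ⟨hv, hG⟩
      | none =>
        obtain ⟨ha, hG1⟩ := ih (i + 1) j memo (by omega) (by omega) hjn (by omega) hG
        obtain ⟨hb, hG2⟩ := ih i (j - 1) (dpGoB p fuel (i + 1) j memo).2
          (by omega) (by omega) (by omega) (by omega) hG1
        have htn1 : (i + 1).toNat = i.toNat + 1 := by omega
        have htn2 : (j - 1).toNat = j.toNat - 1 := by omega
        have hval : max (PySem.List.pyGetD p i 0 - (dpGoB p fuel (i + 1) j memo).1)
              (PySem.List.pyGetD p j 0 -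
                (dpGoB p fuel i (j - 1) (dpGoB p fuel (i + 1) j memo).2).1) =
            fval p i.toNat j.toNat := by
          rw [ha, hb, htn1, htn2, myGetD p i hi, myGetD p j (by omega),
              fval_step p (show i.toNat < j.toNat from by omega)]
        refine ⟨hval, ?_⟩
        intro a b w hw
        rw [PySem.Dict.get?_insert] at hw
        by_cases hk : (a, b) = (i, j)
        · rw [if_pos hk] at hw
          obtain ⟨rfl, rfl⟩ := Prod.mk.injEq .. ▸ hk
          exact ⟨hi, hlt, hjn, by injection hw with h; rw [← h, hval]⟩
        · rw [if_neg hk] at hw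
          exact hG2 a b w hw

theorem dpGoB_empty_good (p : List Int) : GoodMemo p PySem.Dict.empty := by
  intro i j v h
  rw [PySem.Dict.get?_empty] at h
  exact absurd h (by simp)

-- ===== VERDICT (by name: the statement is the Claim_ definition above) =====
theorem result1_spec : Claim_equal_result1 := by
  intro p _hdom hpre
  unfold Pre_result1 at hpre
  unfold Spec_result1
  have hlen : 1 ≤ p.length := List.length_pos_of_ne_nil hpre
  rw [result1_eq_table]
  have hA : PySem.List.pyGetD (PySem.List.pyGetD (tableA p) 0 []) ((p.length : Int) - 1) 0 =
      fval p 0 (p.length - 1) := by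
    rw [myGetDL _ 0 (by omega), myGetD _ _ (by omega)]
    have := tableA_correct p hpre 0 (p.length - 1) (by omega) (by omega)
    unfold g2 at this
    rw [show ((0 : Int)).toNat = 0 from rfl, show ((p.length : Int) - 1).toNat = p.length - 1 from by omega]
    exact this
  have hB : (dpGoB p p.length 0 ((p.length : Int) - 1) PySem.Dict.empty).1 =
      fval p 0 (p.length - 1) := by
    have := (dpGoB_correct p p.length 0 ((p.length : Int) - 1) PySem.Dict.empty
      (by omega) (by omega) (by omega) (by omega) (dpGoB_empty_good p)).1
    rw [this, show ((0 : Int)).toNat = 0 from rfl,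
        show ((p.length : Int) - 1).toNat = p.length - 1 from by omega]
  unfold result1_alt
  rw [hA, hB]
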